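-- pv_equiv track=rewrite | github.com/cod3smith/CausalTarget | modules/neorx/validator.py | _fuzzy_match_reverse
-- ===== SOURCE A (Python) =====
-- def _gene_tokens(name: str) -> set[str]:
--     """Split a gene name on '-' and '/' to get matchable tokens."""
--     return {t for t in name.replace("/", "-").split("-") if t}
--
-- def _fuzzy_match_reverse(
--     ground_truth: set[str], identified: set[str],
-- ) -> set[str]:
--     """Return the subset of *ground_truth* that are found in *identified*.
--
--     Used for calculating FN: a ground truth gene is "found" if
--     any identified gene matches it (exact or token-based).
--     """
--     found: set[str] = set()
--     for gt in ground_truth: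
--         if gt in identified:
--             found.add(gt)
--             continue
--         # Check if any identified gene contains this GT as a token
--         for ident in identified:
--             if gt in _gene_tokens(ident):
--                 found.add(gt)
--                 break
--     return found
-- ===== SOURCE B (Python) =====
-- def _gene_tokens(name: str) -> set[str]:
--     """Split a gene name on '-' and '/' to get matchable tokens."""
--     return {t for t in name.replace("/", "-").split("-") if t}
--
-- def _fuzzy_match_reverse(ground_truth, identified):
--     # Build once the set of all names matchable by identified (exact names + their tokens),
--     # then filter ground_truth against it: no inner scan per ground-truth gene.
--     matchable = set(identified)
--     for ident in identified:
--         matchable.update(_gene_tokens(ident))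
--     return {gt for gt in ground_truth if gt in matchable}
-- ===== Notes on version B (the rewrite author's own statement) =====
-- stated objective: faster
-- what changed: Instead of scanning all identified genes (re-tokenizing each) for every ground-truth gene, B builds the set of matchable names (identified genes plus their tokens) once and then filters ground_truth by a single membership test.
import Mathlib
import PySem

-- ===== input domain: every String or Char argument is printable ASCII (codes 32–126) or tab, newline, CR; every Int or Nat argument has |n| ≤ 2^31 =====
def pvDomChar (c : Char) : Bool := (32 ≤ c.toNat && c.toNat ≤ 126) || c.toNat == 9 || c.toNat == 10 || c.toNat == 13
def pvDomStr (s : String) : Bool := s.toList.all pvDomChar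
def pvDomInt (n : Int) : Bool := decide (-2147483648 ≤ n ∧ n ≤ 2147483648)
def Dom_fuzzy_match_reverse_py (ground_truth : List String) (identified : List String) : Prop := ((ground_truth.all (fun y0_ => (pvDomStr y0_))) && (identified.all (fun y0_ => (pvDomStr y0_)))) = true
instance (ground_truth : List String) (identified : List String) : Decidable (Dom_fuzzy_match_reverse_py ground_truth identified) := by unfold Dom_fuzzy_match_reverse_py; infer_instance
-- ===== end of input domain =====

-- B builds the matchable-name set once and filters ground_truth by membership: asymptotically fewer token computations than A's nested scan.
-- ===== PORT A =====
def gene_tokens_py (name : String) : PySem.Set String :=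
  PySem.Set.ofList (((PySem.Str.split? (PySem.Str.replace name "/" "-") "-").getD []).filter (fun t => t ≠ ""))

def fuzzy_match_reverse_py (ground_truth : List String) (identified : List String) : List String :=
  ground_truth.foldl
    (fun found gt =>
      if identified.contains gt then PySem.Set.add found gt
      else if identified.any (fun ident => (gene_tokens_py ident).contains gt) then PySem.Set.add found gt
      else found)
    PySem.Set.empty

-- ===== PORT B =====
def fuzzy_match_reverse_py_alt (ground_truth : List String) (identified : List String) : List String :=
  let matchable : PySem.Set String :=
    identified.foldl (fun m ident => PySem.Set.update m (gene_tokens_py ident))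
      (PySem.Set.ofList identified)
  ground_truth.foldl
    (fun found gt => if matchable.contains gt then PySem.Set.add found gt else found)
    PySem.Set.empty

-- ===== PRECONDITION & SPEC =====
def Spec_fuzzy_match_reverse_py (ground_truth : List String) (identified : List String) (out : List String) : Prop := out = fuzzy_match_reverse_py_alt ground_truth identified
instance (ground_truth : List String) (identified : List String) (out : List String) : Decidable (Spec_fuzzy_match_reverse_py ground_truth identified out) := by unfold Spec_fuzzy_match_reverse_py; infer_instance

-- ===== CLAIM (what is proved, stated in full; the proofs are below) =====
def Claim_equal_fuzzy_match_reverse_py : Prop := ∀ (ground_truth : List String) (identified : List String), Dom_fuzzy_match_reverse_py ground_truth identified → Spec_fuzzy_match_reverse_py ground_truth identified (fuzzy_match_reverse_py ground_truth identified)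

-- ===== LEMMAS AND PROOFS =====
lemma mem_foldl_update {α : Type} [BEq α] [LawfulBEq α] (f : α → List α) (l : List α)
    (s : PySem.Set α) (x : α) :
    (x ∈ l.foldl (fun m ident => PySem.Set.update m (f ident)) s) ↔
      x ∈ s ∨ ∃ i ∈ l, x ∈ f i := by
  induction l generalizing s with
  | nil => simp
  | cons h t ih =>
    simp only [List.foldl_cons, ih, PySem.Set.mem_update, List.mem_cons]
    constructor
    · rintro ((hs | hf) | ⟨i, hi, hfi⟩)
      · exact Or.inl hs
      · exact Or.inr ⟨h, Or.inl rfl, hf⟩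
      · exact Or.inr ⟨i, Or.inr hi, hfi⟩
    · rintro (hs | ⟨i, (rfl | hi), hfi⟩)
      · exact Or.inl (Or.inl hs)
      · exact Or.inl (Or.inr hfi)
      · exact Or.inr ⟨i, hi, hfi⟩

lemma contains_matchable (identified : List String) (g : String) :
    (identified.foldl (fun m ident => PySem.Set.update m (gene_tokens_py ident))
        (PySem.Set.ofList identified)).contains g =
      (identified.contains g || identified.any (fun ident => (gene_tokens_py ident).contains g)) := by
  rw [Bool.eq_iff_iff]
  simp only [PySem.Set.contains_eq_listContains, List.contains_eq_mem, Bool.or_eq_true, List.any_eq_true, decide_eq_true_eq]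
  rw [mem_foldl_update]
  simp [PySem.Set.mem_ofList]

-- ===== VERDICT (by name: the statement is the Claim_ definition above) =====
theorem fuzzy_match_reverse_py_spec : Claim_equal_fuzzy_match_reverse_py := by
  intro ground_truth identified _
  unfold Spec_fuzzy_match_reverse_py fuzzy_match_reverse_py fuzzy_match_reverse_py_alt
  apply PySem.List.foldl_congr_mem
  intro found g _
  rw [contains_matchable]
  cases h1 : identified.contains g <;>
    cases h2 : identified.any (fun ident => (gene_tokens_py ident).contains g) <;>
      simp
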